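-- pv_equiv track=rewrite | github.com/joshanashakya/dissertation | workspace/dataset/java-python/GeeksForGeeks/4814/A/2.py | kthgroupsum
-- ===== SOURCE A (Python) =====
-- def kthgroupsum( k ):
--
--     # Finding first element of kth group.
--     cur = int((k * (k - 1)) + 1)
--     sum = 0
--
--     # Finding the sum.
--     while k:
--         sum += cur
--         cur += 2
--         k=k-1
--
--     return sum
-- ===== SOURCE B (Python) =====
-- def kthgroupsum(k):
--     # Sum of the k-th group of odd numbers is exactly k**3 (closed form).
--     return k ** 3
-- ===== Notes on version B (the rewrite author's own statement) =====
-- stated objective: faster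
-- what changed: Replaced the O(k) summation loop over the group's odd numbers with the closed-form formula k**3.
import Mathlib
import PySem

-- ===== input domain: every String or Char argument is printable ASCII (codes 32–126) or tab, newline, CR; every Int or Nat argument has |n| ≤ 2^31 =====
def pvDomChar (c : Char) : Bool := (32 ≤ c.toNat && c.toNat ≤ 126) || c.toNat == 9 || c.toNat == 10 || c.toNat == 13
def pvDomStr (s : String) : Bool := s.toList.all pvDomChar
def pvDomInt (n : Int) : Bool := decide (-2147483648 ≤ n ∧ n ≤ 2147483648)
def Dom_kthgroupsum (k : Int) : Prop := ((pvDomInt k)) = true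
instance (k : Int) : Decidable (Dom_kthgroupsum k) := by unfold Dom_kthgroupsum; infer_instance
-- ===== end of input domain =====

-- B replaces A's O(k) summation loop with the closed form k^3 (asymptotically faster).

-- ===== PORT A =====
-- the 'while k:' loop: runs k.toNat times (for k ≥ 0; for k < 0 Python A diverges, excluded by Pre_)
def kthgroupsumLoop : Nat → Int → Int → Int
  | 0, _, sum => sum
  | n + 1, cur, sum => kthgroupsumLoop n (cur + 2) (sum + cur)

def kthgroupsum (k : Int) : Int :=
  kthgroupsumLoop k.toNat (k * (k - 1) + 1) 0

-- ===== PORT B =====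
def kthgroupsum_alt (k : Int) : Int := k ^ 3

-- ===== PRECONDITION & SPEC =====
-- Pre_ excludes k < 0, on which A's 'while k:' loop never terminates (diverges).
def Pre_kthgroupsum (k : Int) : Prop := 0 ≤ k
instance (k : Int) : Decidable (Pre_kthgroupsum k) := by unfold Pre_kthgroupsum; infer_instance
def pvWitness_kthgroupsum : Int := 3

def Spec_kthgroupsum (k : Int) (out : Int) : Prop := out = kthgroupsum_alt k
instance (k : Int) (out : Int) : Decidable (Spec_kthgroupsum k out) := by unfold Spec_kthgroupsum; infer_instance

-- ===== CLAIM =====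
def Claim_equal_kthgroupsum : Prop := ∀ (k : Int), Dom_kthgroupsum k → Pre_kthgroupsum k → Spec_kthgroupsum k (kthgroupsum k)

-- ===== LEMMAS AND PROOFS =====
theorem kthgroupsumLoop_closed (n : Nat) : ∀ (cur sum : Int),
    kthgroupsumLoop n cur sum = sum + n * cur + n * (n - 1) := by
  induction n with
  | zero => intro cur sum; simp [kthgroupsumLoop]
  | succ m ih =>
    intro cur sum
    rw [kthgroupsumLoop, ih]
    push_cast
    ring

-- ===== VERDICT =====
theorem kthgroupsum_spec : Claim_equal_kthgroupsum := by
  intro k _ hk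
  unfold Spec_kthgroupsum kthgroupsum kthgroupsum_alt
  rw [kthgroupsumLoop_closed]
  rw [Int.toNat_of_nonneg hk]
  ring
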